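-- pv_equiv track=rewrite | github.com/siegeld/dobot | tests/servo/test_tester_velocity_cap.py | _step_magnitudes_rpy_axis
-- ===== SOURCE A (Python) =====
-- def _step_magnitudes_rpy_axis(calls, anchor, axis):
--     """Per-tick magnitude of change along one RPY axis (3=RX, 4=RY, 5=RZ)."""
--     out = []
--     prev = anchor[axis]
--     for c in calls:
--         cur = c["pose"][axis]
--         out.append(abs(cur - prev))
--         prev = cur
--     return out
-- ===== SOURCE B (Python) =====
-- def _step_magnitudes_rpy_axis(calls, anchor, axis):
--     """Per-tick magnitude of change along one RPY axis (3=RX, 4=RY, 5=RZ)."""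
--     poses = [c["pose"][axis] for c in calls]
--     rout = []
--     for i in reversed(range(len(poses))):
--         left = anchor[axis] if i == 0 else poses[i - 1]
--         rout.append(abs(poses[i] - left))
--     rout.reverse()
--     return rout
-- ===== Notes on version B (the rewrite author's own statement) =====
-- stated objective: alternative
-- what changed: Replaces the single-pass stateful running-prev accumulator with two stages: materialize the pose values, then build the result back-to-front by a reversed index loop that looks up each tick's left neighbour by random access (anchor for index 0), reversing at the end.
import Mathlib
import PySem

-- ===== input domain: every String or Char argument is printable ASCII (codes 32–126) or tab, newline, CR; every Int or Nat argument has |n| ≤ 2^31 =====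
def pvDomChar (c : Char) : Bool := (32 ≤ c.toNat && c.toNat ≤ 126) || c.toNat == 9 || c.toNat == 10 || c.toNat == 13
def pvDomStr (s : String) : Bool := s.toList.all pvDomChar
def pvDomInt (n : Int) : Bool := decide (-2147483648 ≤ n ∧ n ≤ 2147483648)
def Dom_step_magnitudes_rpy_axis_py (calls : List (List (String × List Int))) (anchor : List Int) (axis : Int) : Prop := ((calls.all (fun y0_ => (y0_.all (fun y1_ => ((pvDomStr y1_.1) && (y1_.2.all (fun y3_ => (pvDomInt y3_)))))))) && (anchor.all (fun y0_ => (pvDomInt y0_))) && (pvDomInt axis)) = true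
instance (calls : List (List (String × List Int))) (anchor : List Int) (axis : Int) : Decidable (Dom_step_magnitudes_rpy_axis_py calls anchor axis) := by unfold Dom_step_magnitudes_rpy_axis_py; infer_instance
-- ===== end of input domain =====

-- B replaces A's stateful running-prev single pass with two stages: materialize the pose values,
-- then a reversed index loop building the result back-to-front (left neighbour by random access), reversed at the end.

-- ===== PORT A =====
-- A: out = []; prev = anchor[axis]; for c in calls: cur = c["pose"][axis]; out.append(abs(cur-prev)); prev = cur
-- (c["pose"] = first-match assoc lookup; pyGetD is legitimate under Pre_, which demands every index/key exist)
def step_magnitudes_rpy_axis_py (calls : List (List (String × List Int))) (anchor : List Int) (axis : Int) : List Int :=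
  let prev := PySem.List.pyGetD anchor axis 0
  (calls.foldl (fun (st : List Int × Int) c =>
      let cur := PySem.List.pyGetD ((List.lookup "pose" c).getD []) axis 0
      (st.1 ++ [|cur - st.2|], cur)) ([], prev)).1

-- ===== PORT B =====
-- B: poses = [c["pose"][axis] for c in calls]; rout = []
--    for i in reversed(range(len(poses))): left = anchor[axis] if i == 0 else poses[i-1]; rout.append(abs(poses[i]-left))
--    rout.reverse(); return rout
def step_magnitudes_rpy_axis_py_alt (calls : List (List (String × List Int))) (anchor : List Int) (axis : Int) : List Int :=
  let poses := calls.map (fun c => PySem.List.pyGetD ((List.lookup "pose" c).getD []) axis 0)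
  let rout := ((PySem.List.pyRange 0 (poses.length : Int) 1).reverse).foldl
      (fun (acc : List Int) (i : Int) =>
        let left := if i = 0 then PySem.List.pyGetD anchor axis 0 else PySem.List.pyGetD poses (i - 1) 0
        acc ++ [|PySem.List.pyGetD poses i 0 - left|]) []
  rout.reverse

-- ===== PRECONDITION & SPEC =====
-- Pre_ excludes exactly the inputs where Python A raises: axis out of range for anchor (IndexError),
-- a call without a "pose" key (KeyError), or axis out of range for some pose list (IndexError).
def Pre_step_magnitudes_rpy_axis_py (calls : List (List (String × List Int))) (anchor : List Int) (axis : Int) : Prop :=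
  PySem.Raise.InRange anchor.length axis ∧
  ∀ c ∈ calls, ∃ p, List.lookup "pose" c = some p ∧ PySem.Raise.InRange p.length axis
instance (calls : List (List (String × List Int))) (anchor : List Int) (axis : Int) : Decidable (Pre_step_magnitudes_rpy_axis_py calls anchor axis) := by unfold Pre_step_magnitudes_rpy_axis_py; infer_instance
def pvWitness_step_magnitudes_rpy_axis_py : (List (List (String × List Int))) × List Int × Int :=
  ([[("pose", [0, 0, 0, 5])], [("pose", [0, 0, 0, -3])]], [0, 0, 0, 2], 3)

def Spec_step_magnitudes_rpy_axis_py (calls : List (List (String × List Int))) (anchor : List Int) (axis : Int) (out : List Int) : Prop := out = step_magnitudes_rpy_axis_py_alt calls anchor axis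
instance (calls : List (List (String × List Int))) (anchor : List Int) (axis : Int) (out : List Int) : Decidable (Spec_step_magnitudes_rpy_axis_py calls anchor axis out) := by unfold Spec_step_magnitudes_rpy_axis_py; infer_instance

-- ===== CLAIM (what is proved, stated in full; the proofs are below) =====
def Claim_equal_step_magnitudes_rpy_axis_py : Prop := ∀ (calls : List (List (String × List Int))) (anchor : List Int) (axis : Int), Dom_step_magnitudes_rpy_axis_py calls anchor axis → Pre_step_magnitudes_rpy_axis_py calls anchor axis → Spec_step_magnitudes_rpy_axis_py calls anchor axis (step_magnitudes_rpy_axis_py calls anchor axis)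

-- ===== LEMMAS AND PROOFS =====

-- proof-only characterization: adjacent absolute differences of a :: ps
def pvDiffs (a : Int) : List Int → List Int
  | [] => []
  | p :: ps => |p - a| :: pvDiffs p ps

-- A's fold with accumulator (out, prev) produces out ++ pvDiffs prev (values of calls).
theorem pv_A_eq_diffs (calls : List (List (String × List Int))) (axis : Int)
    (out : List Int) (prev : Int) :
    (calls.foldl (fun (st : List Int × Int) c =>
        let cur := PySem.List.pyGetD ((List.lookup "pose" c).getD []) axis 0
        (st.1 ++ [|cur - st.2|], cur)) (out, prev)).1
      = out ++ pvDiffs prev (calls.map (fun c => PySem.List.pyGetD ((List.lookup "pose" c).getD []) axis 0)) := by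
  induction calls generalizing out prev with
  | nil => simp [pvDiffs]
  | cons c rest ih =>
    simp only [List.foldl_cons, List.map_cons, pvDiffs]
    rw [ih]
    simp

-- the per-index step of B's reversed loop
def pvStep (anchor : List Int) (axis : Int) (ps : List Int) (i : Int) : Int :=
  |PySem.List.pyGetD ps i 0 -
    (if i = 0 then PySem.List.pyGetD anchor axis 0 else PySem.List.pyGetD ps (i - 1) 0)|

theorem pvStep_succ (anchor : List Int) (axis p : Int) (ps : List Int) (k : Nat) :
    pvStep anchor axis (p :: ps) ((k : Int) + 1) = pvStep [p] 0 ps (k : Int) := by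
  unfold pvStep
  rw [if_neg (by omega : ¬ ((k : Int) + 1 = 0))]
  have h1 : (k : Int) + 1 = ((k + 1 : Nat) : Int) := by omega
  have h2 : (k : Int) + 1 - 1 = ((k : Nat) : Int) := by omega
  rw [h1, h2] at *
  simp only [PySem.List.pyGetD_natCast, List.getD_cons_succ]
  by_cases hk : k = 0
  · subst hk; simp [PySem.List.pyGetD_zero_cons]
  · rw [if_neg (by omega : ¬ ((k : Nat) : Int) = 0)]
    obtain ⟨k', rfl⟩ := Nat.exists_eq_succ_of_ne_zero hk
    have h3 : ((k' + 1 : Nat) : Int) - 1 = ((k' : Nat) : Int) := by omega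
    rw [h3]
    simp [PySem.List.pyGetD_natCast]

theorem pv_map_range_eq_diffs (ps : List Int) (anchor : List Int) (axis : Int) :
    (List.range ps.length).map (fun (k : Nat) => pvStep anchor axis ps (k : Int)) = pvDiffs (PySem.List.pyGetD anchor axis 0) ps := by
  induction ps generalizing anchor axis with
  | nil => simp [pvDiffs]
  | cons p ps ih =>
    rw [show (p :: ps).length = ps.length + 1 from rfl, List.range_succ_eq_map,
        List.map_cons, List.map_map]
    have hhead : pvStep anchor axis (p :: ps) ((0 : Nat) : Int) = |p - PySem.List.pyGetD anchor axis 0| := by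
      simp [pvStep, PySem.List.pyGetD_zero_cons]
    have htail : (List.range ps.length).map ((fun (k : Nat) => pvStep anchor axis (p :: ps) (k : Int)) ∘ Nat.succ)
        = (List.range ps.length).map (fun (k : Nat) => pvStep [p] 0 ps (k : Int)) := by
      refine List.map_congr_left (fun k _ => ?_)
      have : ((Nat.succ k : Nat) : Int) = (k : Int) + 1 := by push_cast; ring
      simp only [Function.comp, this]
      exact pvStep_succ anchor axis p ps k
    rw [hhead, htail, ih, pvDiffs]
    simp [PySem.List.pyGetD_zero_cons]

-- B's definition, reduced to pvDiffs
theorem pv_B_eq_diffs (calls : List (List (String × List Int))) (anchor : List Int) (axis : Int) :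
    step_magnitudes_rpy_axis_py_alt calls anchor axis
      = pvDiffs (PySem.List.pyGetD anchor axis 0)
          (calls.map (fun c => PySem.List.pyGetD ((List.lookup "pose" c).getD []) axis 0)) := by
  unfold step_magnitudes_rpy_axis_py_alt
  simp only []
  rw [PySem.List.foldl_append_singleton_eq_map, List.nil_append, List.map_reverse,
      List.reverse_reverse, PySem.List.pyRange_zero_natCast, List.map_map]
  exact pv_map_range_eq_diffs _ anchor axis

-- ===== VERDICT (by name: the statement is the Claim_ definition above) =====
theorem step_magnitudes_rpy_axis_py_spec : Claim_equal_step_magnitudes_rpy_axis_py := by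
  intro calls anchor axis _ _
  unfold Spec_step_magnitudes_rpy_axis_py step_magnitudes_rpy_axis_py
  rw [pv_A_eq_diffs, List.nil_append, pv_B_eq_diffs]
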